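-- pv_equiv track=rewrite | github.com/Henoru/gobang | main.py | get_pos_from_terminals
-- ===== SOURCE A (Python) =====
-- def get_pos_from_terminals(pos):
--   x,y=-1,-1
--   if len(pos)!=2:
--     return (x,y)
--   if pos[0] in [str(x) for x in range(10)]:
--     x=int(pos[0])
--   if pos[1] in [str(x) for x in range(10)]:
--     y=int(pos[1])
--   if ord(pos[0])-ord('A') in range(5):
--     x=ord(pos[0])-ord('A')+10
--   if ord(pos[1])-ord('A') in range(5):
--     y=ord(pos[1])-ord('A')+10
--   return x,y
-- ===== SOURCE B (Python) =====
-- def get_pos_from_terminals(pos):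
--   if len(pos) != 2:
--     return (-1, -1)
--   table = '0123456789ABCDE'
--   return (table.find(pos[0]), table.find(pos[1]))
-- ===== Notes on version B (the rewrite author's own statement) =====
-- stated objective: simpler
-- what changed: Replaces the four conditional branches (digit-list membership + int() conversion, and ord-arithmetic range tests) with a single 15-character digit/letter lookup table whose find() index is exactly the coordinate, -1 for anything else.
import Mathlib
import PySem

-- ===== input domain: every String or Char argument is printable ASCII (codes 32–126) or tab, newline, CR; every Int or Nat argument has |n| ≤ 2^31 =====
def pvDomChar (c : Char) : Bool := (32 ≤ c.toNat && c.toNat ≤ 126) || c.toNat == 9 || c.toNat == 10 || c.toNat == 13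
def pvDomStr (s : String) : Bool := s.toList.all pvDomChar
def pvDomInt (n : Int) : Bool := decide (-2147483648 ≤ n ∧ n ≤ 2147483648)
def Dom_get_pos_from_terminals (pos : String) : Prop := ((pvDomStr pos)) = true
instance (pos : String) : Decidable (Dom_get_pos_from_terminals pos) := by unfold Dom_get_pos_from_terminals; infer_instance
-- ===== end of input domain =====

-- B replaces A's four digit/letter branches by a single index lookup in the table
-- "0123456789ABCDE" (str.find gives the coordinate or -1); objective: simpler.

-- ===== PORT A =====
-- literal port of A over pos.toList; `int(pos[0])` is guarded by the digit test,
-- so `.getD` Never supplies its default inside a taken branch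
def get_pos_from_terminals (pos : String) : Int × Int :=
  let x : Int := -1
  let y : Int := -1
  match pos.toList with
  | [c0, c1] =>
    -- [str(x) for x in range(10)]
    let digits : List String := (PySem.List.pyRange 0 10 1).map PySem.Int.toStr
    let x := if String.ofList [c0] ∈ digits then (PySem.Int.ofChars? [c0]).getD x else x
    let y := if String.ofList [c1] ∈ digits then (PySem.Int.ofChars? [c1]).getD y else y
    -- ord(pos[i]) - ord('A') in range(5)
    let x := if 0 ≤ (c0.toNat : Int) - 65 ∧ (c0.toNat : Int) - 65 < 5
             then (c0.toNat : Int) - 65 + 10 else x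
    let y := if 0 ≤ (c1.toNat : Int) - 65 ∧ (c1.toNat : Int) - 65 < 5
             then (c1.toNat : Int) - 65 + 10 else y
    (x, y)
  | _ => (x, y)

-- ===== PORT B =====
def get_pos_from_terminals_alt (pos : String) : Int × Int :=
  let cs := pos.toList
  if h : cs.length = 2 then
    let table := "0123456789ABCDE"
    (PySem.Str.find table (String.ofList [cs[0]]), PySem.Str.find table (String.ofList [cs[1]]))
  else (-1, -1)

-- ===== PRECONDITION & SPEC =====
def Spec_get_pos_from_terminals (pos : String) (out : Int × Int) : Prop := out = get_pos_from_terminals_alt pos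
instance (pos : String) (out : Int × Int) : Decidable (Spec_get_pos_from_terminals pos out) := by unfold Spec_get_pos_from_terminals; infer_instance

-- ===== CLAIM (what is proved, stated in full; the proofs are below) =====
def Claim_equal_get_pos_from_terminals : Prop := ∀ (pos : String), Dom_get_pos_from_terminals pos → Spec_get_pos_from_terminals pos (get_pos_from_terminals pos)

-- ===== LEMMAS AND PROOFS =====

theorem char_toNat_inj (a b : Char) (h : a.toNat = b.toNat) : a = b := by
  apply Char.ext
  exact UInt32.toNat_inj.mp h

-- the value A computes for one coordinate equals the table-find B computes
theorem char_key (c : Char) :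
    (if 0 ≤ (c.toNat : Int) - 65 ∧ (c.toNat : Int) - 65 < 5
     then (c.toNat : Int) - 65 + 10
     else if String.ofList [c] ∈ (PySem.List.pyRange 0 10 1).map PySem.Int.toStr
          then (PySem.Int.ofChars? [c]).getD (-1) else (-1))
    = PySem.Str.find "0123456789ABCDE" (String.ofList [c]) := by
  by_cases hc : c ∈ ['0','1','2','3','4','5','6','7','8','9','A','B','C','D','E']
  · fin_cases hc <;> decide
  · have hdig : String.ofList [c] ∉ (PySem.List.pyRange 0 10 1).map PySem.Int.toStr := by
      intro hmem
      have hd : (PySem.List.pyRange 0 10 1).map PySem.Int.toStr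
          = [String.ofList ['0'], String.ofList ['1'], String.ofList ['2'], String.ofList ['3'],
             String.ofList ['4'], String.ofList ['5'], String.ofList ['6'], String.ofList ['7'],
             String.ofList ['8'], String.ofList ['9']] := by decide
      rw [hd] at hmem
      simp only [List.mem_cons, List.not_mem_nil, or_false] at hmem
      rcases hmem with h|h|h|h|h|h|h|h|h|h <;>
        · apply hc
          have h' := congrArg String.toList h
          simp only [String.toList_ofList, List.cons.injEq, and_true] at h'
          simp [h']
    have hlet : ¬ (0 ≤ (c.toNat : Int) - 65 ∧ (c.toNat : Int) - 65 < 5) := by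
      rintro ⟨h1, h2⟩
      have : c.toNat = 65 ∨ c.toNat = 66 ∨ c.toNat = 67 ∨ c.toNat = 68 ∨ c.toNat = 69 := by
        omega
      rcases this with h|h|h|h|h
      · exact hc (by simp [char_toNat_inj c 'A' (by simpa using h)])
      · exact hc (by simp [char_toNat_inj c 'B' (by simpa using h)])
      · exact hc (by simp [char_toNat_inj c 'C' (by simpa using h)])
      · exact hc (by simp [char_toNat_inj c 'D' (by simpa using h)])
      · exact hc (by simp [char_toNat_inj c 'E' (by simpa using h)])
    rw [if_neg hlet, if_neg hdig]
    have hfind : PySem.Str.find "0123456789ABCDE" (String.ofList [c]) = -1 := by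
      rw [PySem.Str.find_eq]
      rw [PySem.Chars.find_eq_neg_one_iff]
      intro hinf
      have : (String.ofList [c]).toList = [c] := by simp
      rw [this] at hinf
      exact hc ((List.singleton_infix_iff c _).mp (by simpa using hinf))
    rw [hfind]

-- ===== VERDICT (by name: the statement is the Claim_ definition above) =====
theorem get_pos_from_terminals_spec : Claim_equal_get_pos_from_terminals := by
  unfold Claim_equal_get_pos_from_terminals
  intro pos _
  obtain ⟨cs, rfl⟩ : ∃ cs, pos = String.ofList cs := ⟨pos.toList, by simp⟩
  unfold Spec_get_pos_from_terminals get_pos_from_terminals get_pos_from_terminals_alt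
  simp only [String.toList_ofList]
  rcases cs with _ | ⟨c0, _ | ⟨c1, _ | ⟨c2, rest⟩⟩⟩
  · rfl
  · rfl
  · simp only [List.length_cons, List.length_nil, dif_pos, List.getElem_cons_zero,
      List.getElem_cons_succ]
    exact Prod.ext_iff.mpr ⟨char_key c0, char_key c1⟩
  · rfl
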